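-- pv_equiv track=rewrite | github.com/C4rnivore/QR | Qr/QrService.py | combine_blocks_with_correction
-- ===== SOURCE A (Python) =====
-- def combine_blocks_with_correction(correction_list):
--     bytes_flow = []
--     blocks, corrections = extract_values(correction_list)
--     range_block = 0
--     range_corr = 0
--
--     for block in blocks:
--         if len(block) > range_block:
--             range_block = len(block)
--
--     for corr in corrections:
--         if len(corr) > range_corr:
--             range_corr = len(corr)
--
--     for i in range(range_block):
--         for block in blocks:
--             if i < len(block):
--                 bytes_flow.append(block[i])
--             else:
--                 continue
--
--     for i in range(range_corr):
--         for corr in corrections: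
--             if i < len(corr):
--                 bytes_flow.append(corr[i])
--             else:
--                 continue
--     return bytes_flow
--
-- def extract_values(correction_list):
--     blocks = []
--     corrections = []
--     prev_was_block = False
--
--     for el in correction_list:
--         if not prev_was_block:
--             blocks.append(el)
--             prev_was_block = True
--         else:
--             corrections.append(el)
--             prev_was_block = False
--
--     return blocks, corrections
-- ===== SOURCE B (Python) =====
-- def combine_blocks_with_correction(correction_list):
--     # split: data blocks at even positions, correction blocks at odd positions
--     return (_interleave(correction_list[::2])
--             + _interleave(correction_list[1::2]))
--
--
-- def _interleave(groups):
--     # column-major flatten by repeatedly peeling the head of every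
--     # still-non-empty group (no index bookkeeping, no max-length pass)
--     out = []
--     while groups:
--         groups = [g for g in groups if g]
--         out.extend(g[0] for g in groups)
--         groups = [g[1:] for g in groups]
--     return out
-- ===== Notes on version B (the rewrite author's own statement) =====
-- stated objective: simpler
-- what changed: B replaces A's boolean-flag alternating split and its two max-length passes plus index-with-bounds-check double loops by slicing the input ([::2]/[1::2]) and head-peeling: repeatedly emit the first element of every still-non-empty group and recurse on the tails.
import Mathlib
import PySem

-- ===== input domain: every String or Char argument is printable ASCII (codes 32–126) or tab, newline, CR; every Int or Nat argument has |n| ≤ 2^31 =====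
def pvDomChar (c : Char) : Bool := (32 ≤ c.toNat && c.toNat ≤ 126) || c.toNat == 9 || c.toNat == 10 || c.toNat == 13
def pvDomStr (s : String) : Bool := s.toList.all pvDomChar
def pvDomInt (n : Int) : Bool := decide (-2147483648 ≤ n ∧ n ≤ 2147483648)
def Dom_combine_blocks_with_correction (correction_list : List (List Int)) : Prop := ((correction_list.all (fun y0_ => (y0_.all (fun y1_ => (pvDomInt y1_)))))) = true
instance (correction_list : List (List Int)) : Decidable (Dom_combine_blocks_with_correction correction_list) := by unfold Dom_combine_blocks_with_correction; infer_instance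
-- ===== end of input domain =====

-- B replaces A's flag-driven split and max-length/index-bounds loops by slicing
-- ([::2] / [1::2]) plus head-peeling of the still-non-empty groups (objective: simpler).

-- ===== PORT A =====
-- helper extract_values: alternating split with the prev_was_block flag
def extract_values (correction_list : List (List Int)) :
    List (List Int) × List (List Int) :=
  let st := correction_list.foldl
    (fun (acc : List (List Int) × List (List Int) × Bool) el =>
      if !acc.2.2 then (acc.1 ++ [el], acc.2.1, true)
      else (acc.1, acc.2.1 ++ [el], false))
    ([], [], false)
  (st.1, st.2.1)

def combine_blocks_with_correction (correction_list : List (List Int)) : List Int :=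
  let bc := extract_values correction_list
  let blocks := bc.1
  let corrections := bc.2
  -- the two max-length loops
  let range_block : Int := blocks.foldl
    (fun r block => if (block.length : Int) > r then (block.length : Int) else r) 0
  let range_corr : Int := corrections.foldl
    (fun r corr => if (corr.length : Int) > r then (corr.length : Int) else r) 0
  -- for i in range(range_block): … (block[i] is guarded by i < len(block), so pyGetD is exact)
  let flow1 := (PySem.List.pyRange 0 range_block 1).foldl
    (fun acc i => blocks.foldl
      (fun a block => if i < (block.length : Int) then a ++ [PySem.List.pyGetD block i 0] else a)
      acc) []
  (PySem.List.pyRange 0 range_corr 1).foldl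
    (fun acc i => corrections.foldl
      (fun a corr => if i < (corr.length : Int) then a ++ [PySem.List.pyGetD corr i 0] else a)
      acc) flow1

-- ===== PORT B =====
-- termination helpers for the while-loop of _interleave (cited by decreasing_by)
theorem pv_sum_filter_le (gs : List (List Int)) :
    (((gs.filter (fun g => !g.isEmpty)).map List.length).sum) ≤ ((gs.map List.length).sum) := by
  induction gs with
  | nil => simp
  | cons g t ih =>
    rw [List.filter_cons]
    by_cases h : g.isEmpty <;> simp only [h, Bool.not_true, Bool.not_false,
      Bool.false_eq_true, List.map_cons, List.sum_cons, if_true, if_false] <;> omega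

theorem pv_sum_tails (gs : List (List Int)) (h : ∀ g ∈ gs, g ≠ []) :
    (((gs.map List.tail).map List.length).sum) + gs.length = ((gs.map List.length).sum) := by
  induction gs with
  | nil => simp
  | cons g t ih =>
    have hg : g ≠ [] := h g (by simp)
    have ht := ih (fun g' hg' => h g' (by simp [hg']))
    have hgl : g.tail.length + 1 = g.length := by
      cases g with
      | nil => exact absurd rfl hg
      | cons a b => simp
    simp only [List.map_cons, List.sum_cons, List.length_cons]
    omega

-- _interleave: while groups: keep non-empty groups, emit their heads, recurse on tails
-- (g[0] under the non-emptiness guard is pyGetD g 0 0; g[1:] is List.tail, cf. PySem.List.slice_from_one)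
def pvInterleave (groups : List (List Int)) : List Int :=
  if groups = [] then []
  else
    let ne := groups.filter (fun g => !g.isEmpty)
    ne.map (fun g => PySem.List.pyGetD g 0 0) ++ pvInterleave (ne.map List.tail)
termination_by ((groups.map List.length).sum, groups.length)
decreasing_by
  rename_i hgs
  have e1 : (List.filter (fun x : {x // x ∈ groups} => !(↑x : List Int).isEmpty) groups.attach).unattach
      = groups.filter (fun g => !g.isEmpty) := by
    rw [List.unattach_filter (g := fun g : List Int => !g.isEmpty) (hf := fun x h => rfl),
      List.unattach_attach]
  rw [e1]
  have hne : ∀ g ∈ groups.filter (fun g => !g.isEmpty), g ≠ [] := by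
    intro g hg
    have := List.of_mem_filter hg
    simpa [List.isEmpty_iff] using this
  have h1 := pv_sum_filter_le groups
  have h2 := pv_sum_tails (groups.filter (fun g => !g.isEmpty)) hne
  have h3 : (groups.filter (fun g => !g.isEmpty)).length ≤ groups.length :=
    List.length_filter_le _ _
  have hlen : 1 ≤ groups.length := by
    cases groups with
    | nil => exact absurd rfl hgs
    | cons a b => simp
  simp only [Prod.lex_iff, List.length_map]
  omega

-- correction_list[::2] and [1::2] (step 2 is never 0, so slice? always returns)
def combine_blocks_with_correction_alt (correction_list : List (List Int)) : List Int :=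
  pvInterleave ((PySem.List.slice? correction_list none none 2).getD [])
    ++ pvInterleave ((PySem.List.slice? correction_list (some 1) none 2).getD [])

-- ===== PRECONDITION & SPEC =====
def Spec_combine_blocks_with_correction (correction_list : List (List Int)) (out : List Int) : Prop := out = combine_blocks_with_correction_alt correction_list
instance (correction_list : List (List Int)) (out : List Int) : Decidable (Spec_combine_blocks_with_correction correction_list out) := by unfold Spec_combine_blocks_with_correction; infer_instance

-- ===== CLAIM (what is proved, stated in full; the proofs are below) =====
def Claim_equal_combine_blocks_with_correction : Prop := ∀ (correction_list : List (List Int)), Dom_combine_blocks_with_correction correction_list → Spec_combine_blocks_with_correction correction_list (combine_blocks_with_correction correction_list)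

-- ===== LEMMAS AND PROOFS =====

-- every other element, starting at index 0
def pvEvens : List (List Int) → List (List Int)
  | [] => []
  | [x] => [x]
  | x :: _ :: r => x :: pvEvens r

theorem pvEvens_cons (x : List Int) (t : List (List Int)) :
    pvEvens (x :: t) = x :: pvEvens t.tail := by
  cases t <;> rfl

-- column-major flatten: the common characterisation of both programs
def colFlat (n : Nat) (gs : List (List Int)) : List Int :=
  (List.range n).flatMap (fun i => gs.filterMap (fun g => g[i]?))

-- A's flag-driven split = even- and odd-position sublists
theorem extract_values_foldl (l : List (List Int)) :
    ∀ (bs cs : List (List Int)),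
      (l.foldl (fun (acc : List (List Int) × List (List Int) × Bool) el =>
        if !acc.2.2 then (acc.1 ++ [el], acc.2.1, true)
        else (acc.1, acc.2.1 ++ [el], false)) (bs, cs, false)).1 = bs ++ pvEvens l
      ∧ (l.foldl (fun (acc : List (List Int) × List (List Int) × Bool) el =>
        if !acc.2.2 then (acc.1 ++ [el], acc.2.1, true)
        else (acc.1, acc.2.1 ++ [el], false)) (bs, cs, false)).2.1 = cs ++ pvEvens l.tail := by
  induction l using pvEvens.induct with
  | case1 => simp [pvEvens]
  | case2 x => intro bs cs; simp [pvEvens]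
  | case3 x y r ih =>
    intro bs cs
    obtain ⟨h1, h2⟩ := ih (bs ++ [x]) (cs ++ [y])
    simp only [List.foldl_cons, Bool.not_false, Bool.not_true, if_true, if_false,
      Bool.false_eq_true, ite_true, ite_false, pvEvens] at *
    constructor
    · rw [h1]; simp
    · rw [h2]; simp [pvEvens_cons]

theorem extract_values_eq (l : List (List Int)) :
    extract_values l = (pvEvens l, pvEvens l.tail) := by
  have := extract_values_foldl l [] []
  unfold extract_values
  ext1
  · simpa using this.1
  · simpa using this.2

-- A's max-length loop over Int = the Nat fold of max
theorem max_foldl_int (gs : List (List Int)) : ∀ (r : Nat),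
    gs.foldl (fun r block => if (block.length : Int) > r then (block.length : Int) else r) (r : Int)
      = ((gs.foldl (fun r block => max r block.length) r : Nat) : Int) := by
  induction gs with
  | nil => intro r; rfl
  | cons g t ih =>
    intro r
    simp only [List.foldl_cons]
    have : (if (g.length : Int) > (r : Int) then (g.length : Int) else (r : Int))
        = ((max r g.length : Nat) : Int) := by
      split_ifs with h <;> omega
    rw [this, ih]

theorem le_max_foldl (gs : List (List Int)) : ∀ (r : Nat) (g : List Int), g ∈ gs →
    g.length ≤ gs.foldl (fun r block => max r block.length) r := by
  induction gs with
  | nil => intro r g h; cases h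
  | cons a t ih =>
    intro r g h
    rcases List.mem_cons.mp h with h | h
    · subst h
      have : ∀ (s : Nat) t, s ≤ List.foldl (fun r block => max r (block : List Int).length) s t := by
        intro s t
        induction t generalizing s with
        | nil => simp
        | cons b u ihu => simpa using le_trans (le_max_left s b.length) (ihu _)
      exact le_trans (le_max_right r g.length) (this _ t)
    · exact ih _ g h

-- A's inner bounded-index loop = one column
theorem inner_foldl (gs : List (List Int)) (i : Nat) : ∀ (acc : List Int),
    gs.foldl (fun a g => if (i : Int) < (g.length : Int) then a ++ [PySem.List.pyGetD g (i : Int) 0] else a) acc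
      = acc ++ gs.filterMap (fun g => g[i]?) := by
  induction gs with
  | nil => simp
  | cons g t ih =>
    intro acc
    simp only [List.foldl_cons, List.filterMap_cons]
    by_cases h : i < g.length
    · rw [if_pos (by exact_mod_cast h)]
      rw [ih]
      rw [List.getElem?_eq_getElem h]
      simp [PySem.List.pyGetD_natCast, List.getD_eq_getElem?_getD, List.getElem?_eq_getElem h]
    · rw [if_neg (by exact_mod_cast h)]
      rw [ih, List.getElem?_eq_none (by omega)]

-- A's outer loop over range(n) = colFlat n
theorem outer_foldl (gs : List (List Int)) : ∀ (n : Nat) (acc : List Int),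
    (List.range n).foldl
      (fun acc (k : Nat) => gs.foldl
        (fun a g => if (k : Int) < (g.length : Int) then a ++ [PySem.List.pyGetD g (k : Int) 0] else a) acc) acc
      = acc ++ colFlat n gs := by
  intro n
  induction n with
  | zero => intro acc; simp [colFlat]
  | succ m ih =>
    intro acc
    rw [List.range_succ, List.foldl_append, ih]
    simp only [List.foldl_cons, List.foldl_nil]
    rw [inner_foldl gs m]
    simp [colFlat, List.range_succ, List.append_assoc]

-- columns of index 0 / successor index
theorem col_zero (gs : List (List Int)) :
    gs.filterMap (fun g => g[0]?)
      = (gs.filter (fun g => !g.isEmpty)).map (fun g => PySem.List.pyGetD g 0 0) := by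
  induction gs with
  | nil => simp
  | cons g t ih =>
    cases g with
    | nil => simpa using ih
    | cons a b =>
      simp only [List.filterMap_cons, List.filter_cons, List.getElem?_cons_zero,
        List.isEmpty_cons, Bool.not_false, if_true]
      rw [ih]
      simp [PySem.List.pyGetD]

theorem col_succ (gs : List (List Int)) (i : Nat) :
    gs.filterMap (fun g => g[i + 1]?)
      = ((gs.filter (fun g => !g.isEmpty)).map List.tail).filterMap (fun g => g[i]?) := by
  induction gs with
  | nil => simp
  | cons g t ih =>
    cases g with
    | nil => simpa using ih
    | cons a b =>
      simp only [List.filterMap_cons, List.filter_cons, List.isEmpty_cons, Bool.not_false,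
        if_true, List.map_cons, List.getElem?_cons_succ, List.tail_cons]
      rw [ih]

theorem filter_all_empty (gs : List (List Int)) (h : ∀ g ∈ gs, g = []) :
    gs.filter (fun g => !g.isEmpty) = [] := by
  rw [List.filter_eq_nil_iff]
  intro g hg
  simp [h g hg]

theorem pvInterleave_nil : pvInterleave [] = [] := by
  rw [pvInterleave]
  simp

-- B's head-peeling loop computes colFlat for any n bounding all lengths
theorem pvInterleave_eq_colFlat : ∀ (n : Nat) (gs : List (List Int)),
    (∀ g ∈ gs, g.length ≤ n) → pvInterleave gs = colFlat n gs := by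
  intro n
  induction n with
  | zero =>
    intro gs h
    have hall : ∀ g ∈ gs, g = [] := by
      intro g hg
      exact List.eq_nil_of_length_eq_zero (Nat.le_zero.mp (h g hg))
    rw [pvInterleave]
    by_cases hgs : gs = []
    · simp [hgs, colFlat]
    · rw [if_neg hgs, filter_all_empty gs hall]
      simp [pvInterleave_nil, colFlat]
  | succ m ih =>
    intro gs h
    by_cases hgs : gs = []
    · subst hgs
      simp [pvInterleave_nil, colFlat]
    · rw [pvInterleave, if_neg hgs]
      have hcol : colFlat (m + 1) gs
          = gs.filterMap (fun g => g[0]?)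
            ++ colFlat m ((gs.filter (fun g => !g.isEmpty)).map List.tail) := by
        rw [colFlat, List.range_succ_eq_map, List.flatMap_cons]
        congr 1
        rw [List.flatMap_map, colFlat]
        exact List.flatMap_congr (fun a _ => by
          rw [Nat.succ_eq_add_one, col_succ])
      rw [hcol, col_zero]
      dsimp only
      congr 1
      apply ih
      intro g' hg'
      rcases List.mem_map.mp hg' with ⟨g, hg, rfl⟩
      have hmem : g ∈ gs := (List.mem_filter.mp hg).1
      have := h g hmem
      simp [List.length_tail]
      omega

-- slicing with step 2 picks the even-position elements
theorem filterMap_double_range : ∀ (n : Nat) (xs : List (List Int)), xs.length ≤ 2 * n →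
    (List.range n).filterMap (fun k => xs[2 * k]?) = pvEvens xs := by
  intro n
  induction n with
  | zero =>
    intro xs h
    have : xs = [] := List.eq_nil_of_length_eq_zero (by omega)
    subst this
    rfl
  | succ m ih =>
    intro xs h
    rw [List.range_succ_eq_map, List.filterMap_cons, List.filterMap_map]
    cases xs with
    | nil => simp [pvEvens]
    | cons x t =>
      cases t with
      | nil =>
        simp only [Nat.mul_zero, List.getElem?_cons_zero]
        have hid : ∀ k : Nat, ([x] : List (List Int))[2 * (k + 1)]? = none := by
          intro k
          apply List.getElem?_eq_none
          simp; omega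
        have hnone : (List.range m).filterMap ((fun k => ([x] : List (List Int))[2 * k]?) ∘ Nat.succ) = [] := by
          rw [List.filterMap_eq_nil_iff]
          intro a ha
          simp only [Function.comp_apply]
          rw [Nat.succ_eq_add_one, hid a]
        rw [hnone]
        rfl
      | cons y r =>
        have hfun : ((fun k => (x :: y :: r : List (List Int))[2 * k]?) ∘ Nat.succ)
            = fun k => r[2 * k]? := by
          funext k
          simp only [Function.comp_apply]
          rw [Nat.succ_eq_add_one, show 2 * (k + 1) = 2 * k + 1 + 1 by ring]
          simp [List.getElem?_cons_succ]
        rw [hfun, ih r (by simp at h; omega)]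
        rfl

theorem slice2_evens (xs : List (List Int)) :
    PySem.List.slice? xs none none 2 = some (pvEvens xs) := by
  simp only [PySem.List.slice?, PySem.List.sliceIndices, Option.some.injEq]
  norm_num
  rw [List.filterMap_congr (g := fun k => xs[2 * k]?)
    (fun a _ => by rw [show ((2 : Int) * (a : Int)).toNat = 2 * a by omega])]
  apply filterMap_double_range
  split_ifs with h
  · omega
  · omega

theorem slice2_odds (xs : List (List Int)) :
    PySem.List.slice? xs (some 1) none 2 = some (pvEvens xs.tail) := by
  cases xs with
  | nil => rfl
  | cons x t =>
    simp only [PySem.List.slice?, PySem.List.sliceIndices, Option.some.injEq]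
    norm_num
    rw [List.filterMap_congr (g := fun k => t[2 * k]?) (fun a _ => by
      rw [show ((1 : Int) + 2 * (a : Int)).toNat = 2 * a + 1 by omega]
      simp [List.getElem?_cons_succ])]
    apply filterMap_double_range
    split_ifs with h
    · omega
    · omega

-- ===== VERDICT (by name: the statement is the Claim_ definition above) =====
theorem combine_blocks_with_correction_spec : Claim_equal_combine_blocks_with_correction := by
  intro l _dom
  unfold Spec_combine_blocks_with_correction
  unfold combine_blocks_with_correction combine_blocks_with_correction_alt
  rw [extract_values_eq]
  dsimp only
  rw [slice2_evens, slice2_odds]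
  dsimp only [Option.getD_some]
  have e1 := max_foldl_int (pvEvens l) 0
  have e2 := max_foldl_int (pvEvens l.tail) 0
  rw [show ((0 : Nat) : Int) = 0 from rfl] at e1 e2
  rw [e1, e2, PySem.List.pyRange_zero_natCast, PySem.List.pyRange_zero_natCast,
    List.foldl_map, List.foldl_map, outer_foldl, outer_foldl]
  rw [pvInterleave_eq_colFlat ((pvEvens l).foldl (fun r block => max r block.length) 0) (pvEvens l)
      (fun g hg => le_max_foldl _ 0 g hg),
    pvInterleave_eq_colFlat ((pvEvens l.tail).foldl (fun r block => max r block.length) 0) (pvEvens l.tail)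
      (fun g hg => le_max_foldl _ 0 g hg)]
  simp
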